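-- pv_equiv track=rewrite | github.com/jakel2008/goldprofx | forex_analyzer.py | _is_crypto_symbol
-- ===== SOURCE A (Python) =====
-- CRYPTO_BINANCE_SYMBOLS = {
--     "BTCUSD": "BTCUSDT",
--     "ETHUSD": "ETHUSDT",
--     "BNBUSD": "BNBUSDT",
--     "SOLUSD": "SOLUSDT",
--     "XRPUSD": "XRPUSDT",
--     "ADAUSD": "ADAUSDT",
--     "DOGEUSD": "DOGEUSDT",
--     "LTCUSD": "LTCUSDT",
--     "BTC/USDT": "BTCUSDT",
--     "ETH/USDT": "ETHUSDT",
--     "BNB/USDT": "BNBUSDT",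
--     "SOL/USDT": "SOLUSDT",
--     "XRP/USDT": "XRPUSDT",
--     "BTC/USDC": "BTCUSDC",
--     "ETH/USDC": "ETHUSDC"
-- }
--
-- KNOWN_CRYPTO_BASES = {
--     "BTC", "ETH", "BNB", "SOL", "XRP", "ADA", "DOGE", "LTC",
--     "DOT", "AVAX", "LINK", "TRX", "MATIC", "UNI", "ATOM", "BCH"
-- }
--
-- def _normalize_symbol(symbol):
--     return str(symbol or "").strip().upper().replace("/", "").replace("-", "").replace("_", "").replace(" ", "")
--
-- def _is_crypto_symbol(symbol):
--     normalized = _normalize_symbol(symbol)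
--     if normalized in CRYPTO_BINANCE_SYMBOLS:
--         return True
--
--     for quote in ("USDT", "USDC", "USD"):
--         if normalized.endswith(quote) and len(normalized) > len(quote):
--             base = normalized[:-len(quote)]
--             return base in KNOWN_CRYPTO_BASES
--
--     return False
-- ===== SOURCE B (Python) =====
-- KNOWN_CRYPTO_BASES = {
--     "BTC", "ETH", "BNB", "SOL", "XRP", "ADA", "DOGE", "LTC",
--     "DOT", "AVAX", "LINK", "TRX", "MATIC", "UNI", "ATOM", "BCH"
-- }
--
-- # Every symbol A accepts is base+quote after normalization (the separator-free
-- # keys of its lookup dict are all base+'USD' with base in KNOWN_CRYPTO_BASES),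
-- # so one precomputed cross-product set replaces the dict check and suffix loop.
-- CRYPTO_SET = frozenset(
--     base + quote
--     for base in KNOWN_CRYPTO_BASES
--     for quote in ("USDT", "USDC", "USD")
-- )
--
--
-- def _normalize_symbol(symbol):
--     return str(symbol or "").strip().upper().replace("/", "").replace("-", "").replace("_", "").replace(" ", "")
--
--
-- def _is_crypto_symbol(symbol):
--     return _normalize_symbol(symbol) in CRYPTO_SET
-- ===== Notes on version B (the rewrite author's own statement) =====
-- stated objective: simpler
-- what changed: Replaces A's dict-membership check plus early-return suffix loop with a single membership test in a cross-product set (base+quote) precomputed once at module load; correct because the three quotes end in distinct characters and every separator-free dict key is already base+'USD' with a known base.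
import Mathlib
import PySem

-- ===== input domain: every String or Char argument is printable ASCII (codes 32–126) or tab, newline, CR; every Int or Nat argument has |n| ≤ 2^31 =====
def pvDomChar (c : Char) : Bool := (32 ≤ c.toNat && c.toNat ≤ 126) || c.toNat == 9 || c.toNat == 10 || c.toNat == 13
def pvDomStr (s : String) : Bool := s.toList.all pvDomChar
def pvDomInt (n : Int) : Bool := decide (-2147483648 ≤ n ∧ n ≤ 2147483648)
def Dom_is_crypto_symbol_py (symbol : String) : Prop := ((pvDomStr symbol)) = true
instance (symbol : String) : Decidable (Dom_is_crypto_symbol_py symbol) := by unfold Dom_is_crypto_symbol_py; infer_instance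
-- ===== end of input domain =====

-- B replaces A's dict check + early-return suffix loop with one membership test
-- in a precomputed base×quote cross-product set (objective: simpler).

set_option maxRecDepth 8192


-- ===== PORT A =====
-- str(symbol or "") is the identity on str inputs, so the port starts at .strip()
def pvNormalize (symbol : String) : String :=
  PySem.Str.replace
    (PySem.Str.replace
      (PySem.Str.replace
        (PySem.Str.replace (PySem.Str.upper (PySem.Str.strip symbol)) "/" "")
        "-" "")
      "_" "")
    " " ""

def pvCryptoDict : PySem.Dict String String := PySem.Dict.ofList
  [("BTCUSD", "BTCUSDT"), ("ETHUSD", "ETHUSDT"), ("BNBUSD", "BNBUSDT"),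
   ("SOLUSD", "SOLUSDT"), ("XRPUSD", "XRPUSDT"), ("ADAUSD", "ADAUSDT"),
   ("DOGEUSD", "DOGEUSDT"), ("LTCUSD", "LTCUSDT"),
   ("BTC/USDT", "BTCUSDT"), ("ETH/USDT", "ETHUSDT"), ("BNB/USDT", "BNBUSDT"),
   ("SOL/USDT", "SOLUSDT"), ("XRP/USDT", "XRPUSDT"),
   ("BTC/USDC", "BTCUSDC"), ("ETH/USDC", "ETHUSDC")]

def pvKnownBases : PySem.Set String := PySem.Set.ofList
  ["BTC", "ETH", "BNB", "SOL", "XRP", "ADA", "DOGE", "LTC",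
   "DOT", "AVAX", "LINK", "TRX", "MATIC", "UNI", "ATOM", "BCH"]

-- the 'for quote in ("USDT","USDC","USD"): if … return …' loop of A
def pvQuoteLoop (normalized : String) : List String → Bool
  | [] => false
  | q :: rest =>
    if PySem.Str.endswith normalized q && decide (PySem.Str.len normalized > PySem.Str.len q) then
      PySem.Set.contains pvKnownBases (PySem.Str.slice normalized none (some (-(PySem.Str.len q))))
    else pvQuoteLoop normalized rest

def is_crypto_symbol_py (symbol : String) : Bool :=
  let normalized := pvNormalize symbol
  if pvCryptoDict.contains normalized then true
  else pvQuoteLoop normalized ["USDT", "USDC", "USD"]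

-- ===== PORT B =====
def pvCryptoSet : PySem.Set String :=
  PySem.Set.ofList
    ((pvKnownBases : List String).flatMap
      (fun base => ["USDT", "USDC", "USD"].map (fun quote => base ++ quote)))

def is_crypto_symbol_py_alt (symbol : String) : Bool :=
  PySem.Set.contains pvCryptoSet (pvNormalize symbol)

-- ===== PRECONDITION & SPEC =====
def Spec_is_crypto_symbol_py (symbol : String) (out : Bool) : Prop := out = is_crypto_symbol_py_alt symbol
instance (symbol : String) (out : Bool) : Decidable (Spec_is_crypto_symbol_py symbol out) := by unfold Spec_is_crypto_symbol_py; infer_instance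

-- ===== CLAIM (what is proved, stated in full; the proofs are below) =====
def Claim_equal_is_crypto_symbol_py : Prop := ∀ (symbol : String), Dom_is_crypto_symbol_py symbol → Spec_is_crypto_symbol_py symbol (is_crypto_symbol_py symbol)

-- ===== LEMMAS AND PROOFS =====

-- one step of replace.go
lemma pv_go_succ_cons (old new : List Char) (n : Nat) (c : Char) (t acc : List Char) :
    PySem.Chars.replace.go old new (n+1) (c::t) acc =
    if old.isPrefixOf (c::t) then
      PySem.Chars.replace.go old new n (List.drop old.length (c::t)) (new.reverse ++ acc)
    else PySem.Chars.replace.go old new n t (c :: acc) := by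
  simp [PySem.Chars.replace.go]

lemma pv_mem_go (old new : List Char) :
    ∀ (fuel : Nat) (l acc : List Char) (x : Char),
      x ∈ PySem.Chars.replace.go old new fuel l acc → x ∈ l ∨ x ∈ new ∨ x ∈ acc := by
  intro fuel
  induction fuel with
  | zero =>
    intro l acc x h
    simp [PySem.Chars.replace.go] at h
    tauto
  | succ n ih =>
    intro l acc x h
    cases l with
    | nil =>
      simp [PySem.Chars.replace.go] at h
      tauto
    | cons c t =>
      rw [pv_go_succ_cons] at h
      by_cases hp : old.isPrefixOf (c :: t)
      · rw [if_pos hp] at h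
        rcases ih _ _ _ h with h1 | h1 | h1
        · exact Or.inl (List.mem_of_mem_drop h1)
        · exact Or.inr (Or.inl h1)
        · rcases List.mem_append.mp h1 with h2 | h2
          · exact Or.inr (Or.inl (List.mem_reverse.mp h2))
          · exact Or.inr (Or.inr h2)
      · rw [if_neg hp] at h
        rcases ih _ _ _ h with h1 | h1 | h1
        · exact Or.inl (List.mem_cons_of_mem _ h1)
        · exact Or.inr (Or.inl h1)
        · rcases List.mem_cons.mp h1 with h2 | h2
          · exact Or.inl (h2 ▸ List.mem_cons_self)
          · exact Or.inr (Or.inr h2)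

lemma pv_mem_replace (s old new : List Char) (h : old ≠ []) (x : Char)
    (hx : x ∈ PySem.Chars.replace s old new) : x ∈ s ∨ x ∈ new := by
  unfold PySem.Chars.replace at hx
  rw [if_neg (by simpa [List.isEmpty_iff] using h)] at hx
  rcases pv_mem_go old new s.length s [] x hx with h1 | h1 | h1
  · exact Or.inl h1
  · exact Or.inr h1
  · cases h1

-- replacing a single character by "" removes every occurrence of it
lemma pv_go_removes (o : Char) :
    ∀ (fuel : Nat) (l acc : List Char), l.length ≤ fuel → o ∉ acc →
      o ∉ PySem.Chars.replace.go [o] [] fuel l acc := by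
  intro fuel
  induction fuel with
  | zero =>
    intro l acc hlen hacc
    interval_cases h : l.length
    · rw [List.length_eq_zero_iff] at h
      subst h
      simpa [PySem.Chars.replace.go] using hacc
  | succ n ih =>
    intro l acc hlen hacc
    cases l with
    | nil => simpa [PySem.Chars.replace.go] using hacc
    | cons c t =>
      rw [pv_go_succ_cons]
      by_cases hp : List.isPrefixOf [o] (c :: t)
      · rw [if_pos hp]
        simp only [List.length_cons] at hlen
        simpa using ih t acc (by omega) hacc
      · rw [if_neg hp]
        simp only [List.length_cons] at hlen
        have hco : c ≠ o := by
          intro hco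
          exact hp (by simp [hco, List.isPrefixOf])
        refine ih t (c :: acc) (by omega) ?_
        intro hm
        rcases List.mem_cons.mp hm with h2 | h2
        · exact hco h2.symm
        · exact hacc h2

lemma pv_replace_removes (s : List Char) (o : Char) :
    o ∉ PySem.Chars.replace s [o] [] := by
  unfold PySem.Chars.replace
  rw [if_neg (by simp)]
  exact pv_go_removes o s.length s [] le_rfl (by simp)

-- the normalized symbol contains no '/'
lemma pv_normalize_no_slash (symbol : String) : '/' ∉ (pvNormalize symbol).toList := by
  unfold pvNormalize
  intro h
  simp only [PySem.Str.toList_replace] at h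
  have h1 := pv_mem_replace _ _ _ (by decide) _ h
  rcases h1 with h1 | h1
  · have h2 := pv_mem_replace _ _ _ (by decide) _ h1
    rcases h2 with h2 | h2
    · have h3 := pv_mem_replace _ _ _ (by decide) _ h2
      rcases h3 with h3 | h3
      · exact pv_replace_removes _ _ (by simpa using h3)
      · simp at h3
    · simp at h2
  · simp at h1

-- a string ending in q is (its slice without the last |q| chars) ++ q
lemma pv_endswith_slice (n q : String) (hk : 0 < q.toList.length)
    (hend : PySem.Str.endswith n q = true) :
    n = PySem.Str.slice n none (some (-(PySem.Str.len q))) ++ q := by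
  have hsuf : q.toList <:+ n.toList := by
    rw [PySem.Str.endswith_eq, PySem.Chars.endswith_iff] at hend
    exact hend
  obtain ⟨t, ht⟩ := hsuf
  apply String.toList_inj.mp
  rw [String.toList_append]
  have hlen : PySem.Str.len q = ((q.toList.length : Nat) : Int) := by
    simp [PySem.Str.len_eq]
  rw [hlen]
  have hslice : (PySem.Str.slice n none (some (-((q.toList.length : Nat) : Int)))).toList
      = n.toList.take (n.toList.length - q.toList.length) := by
    simp only [PySem.Str.toList_slice, PySem.Chars.slice_eq_listSlice]
    exact PySem.List.slice_to_neg_natCast n.toList q.toList.length hk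
  rw [hslice, ← ht]
  have htl : (t ++ q.toList).length - q.toList.length = t.length := by simp
  rw [htl, List.take_left]

-- if n is not in the cross-product set, no suffix branch of A's loop can fire
lemma pv_base_not_known (n q : String) (hk : 0 < q.toList.length)
    (hq : ∀ b ∈ (pvKnownBases : List String), (b ++ q) ∈ (pvCryptoSet : List String))
    (hm : n ∉ (pvCryptoSet : List String))
    (hend : PySem.Str.endswith n q = true) :
    PySem.Set.contains pvKnownBases (PySem.Str.slice n none (some (-(PySem.Str.len q)))) = false := by
  rw [Bool.eq_false_iff]
  intro hc
  have hb := (PySem.Set.contains_iff _ _).mp hc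
  have heq := pv_endswith_slice n q hk hend
  exact hm (heq ▸ hq _ hb)

lemma pv_core (n : String) (hs : '/' ∉ n.toList) :
    (if pvCryptoDict.contains n then true else pvQuoteLoop n ["USDT", "USDC", "USD"])
      = PySem.Set.contains pvCryptoSet n := by
  by_cases hm : n ∈ (pvCryptoSet : List String)
  · rw [show (pvCryptoSet : List String) =
      ["BTCUSDT", "BTCUSDC", "BTCUSD", "ETHUSDT", "ETHUSDC", "ETHUSD",
       "BNBUSDT", "BNBUSDC", "BNBUSD", "SOLUSDT", "SOLUSDC", "SOLUSD",
       "XRPUSDT", "XRPUSDC", "XRPUSD", "ADAUSDT", "ADAUSDC", "ADAUSD",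
       "DOGEUSDT", "DOGEUSDC", "DOGEUSD", "LTCUSDT", "LTCUSDC", "LTCUSD",
       "DOTUSDT", "DOTUSDC", "DOTUSD", "AVAXUSDT", "AVAXUSDC", "AVAXUSD",
       "LINKUSDT", "LINKUSDC", "LINKUSD", "TRXUSDT", "TRXUSDC", "TRXUSD",
       "MATICUSDT", "MATICUSDC", "MATICUSD", "UNIUSDT", "UNIUSDC", "UNIUSD",
       "ATOMUSDT", "ATOMUSDC", "ATOMUSD", "BCHUSDT", "BCHUSDC", "BCHUSD"] from by decide] at hm
    simp only [List.mem_cons, List.not_mem_nil, or_false] at hm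
    rcases hm with rfl|rfl|rfl|rfl|rfl|rfl|rfl|rfl|rfl|rfl|rfl|rfl|rfl|rfl|rfl|rfl|rfl|rfl|rfl|rfl|rfl|rfl|rfl|rfl|rfl|rfl|rfl|rfl|rfl|rfl|rfl|rfl|rfl|rfl|rfl|rfl|rfl|rfl|rfl|rfl|rfl|rfl|rfl|rfl|rfl|rfl|rfl|rfl <;> decide
  · have hrhs : PySem.Set.contains pvCryptoSet n = false := by
      rw [Bool.eq_false_iff]
      intro hc
      exact hm ((PySem.Set.contains_iff _ _).mp hc)
    rw [hrhs]
    have hd : pvCryptoDict.contains n = false := by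
      rw [Bool.eq_false_iff]
      intro hc
      have hk := (PySem.Dict.contains_iff_mem_keys _ _).mp hc
      rw [show pvCryptoDict.keys =
        ["BTCUSD", "ETHUSD", "BNBUSD", "SOLUSD", "XRPUSD", "ADAUSD", "DOGEUSD",
         "LTCUSD", "BTC/USDT", "ETH/USDT", "BNB/USDT", "SOL/USDT", "XRP/USDT",
         "BTC/USDC", "ETH/USDC"] from by decide] at hk
      simp only [List.mem_cons, List.not_mem_nil, or_false] at hk
      rcases hk with rfl|rfl|rfl|rfl|rfl|rfl|rfl|rfl|rfl|rfl|rfl|rfl|rfl|rfl|rfl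
      all_goals first
        | exact hm (by decide)
        | exact hs (by decide)
    rw [if_neg (by simp [hd])]
    simp only [pvQuoteLoop]
    split_ifs with h1 h2 h3
    · exact pv_base_not_known n "USDT" (by decide) (by decide) hm (by have hx := h1; simp only [Bool.and_eq_true] at hx; exact hx.1)
    · exact pv_base_not_known n "USDC" (by decide) (by decide) hm (by have hx := h2; simp only [Bool.and_eq_true] at hx; exact hx.1)
    · exact pv_base_not_known n "USD" (by decide) (by decide) hm (by have hx := h3; simp only [Bool.and_eq_true] at hx; exact hx.1)
    · rfl

-- ===== VERDICT (by name: the statement is the Claim_ definition above) =====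
theorem is_crypto_symbol_py_spec : Claim_equal_is_crypto_symbol_py := by
  intro symbol _
  unfold Spec_is_crypto_symbol_py is_crypto_symbol_py is_crypto_symbol_py_alt
  exact pv_core (pvNormalize symbol) (pv_normalize_no_slash symbol)
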